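-- pv_equiv track=rewrite | github.com/RachideMab/RachideMab | controllers/controller.py | generate_pair
-- ===== SOURCE A (Python) =====
-- def generate_pair(ids_list):
--     """Generating player_ids pairs from the 2nd round
--     params:
--             - ids_list: list of player Ids
--     """
--
--     # Extract player_ids at even indexes 0, 2, 4, 6
--     first_half = ids_list[0::2]
--     # Extract player_ids at odd indexes 1, 3, 5, 7
--     second_half = ids_list[1::2]
--     list_of_pair = []
--
--     nbr_of_pair = int(len(ids_list)/2)
--
--     for i in range(nbr_of_pair):
--         pair = (first_half.pop(0), second_half.pop(0))
--         list_of_pair.append(pair)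
--
--     return list_of_pair
-- ===== SOURCE B (Python) =====
-- def generate_pair(ids_list):
--     """Generating player_ids pairs from the 2nd round
--     params:
--             - ids_list: list of player Ids
--     """
--     list_of_pair = []
--     prev = None
--     for i, player_id in enumerate(ids_list):
--         if i % 2 == 0:
--             prev = player_id
--         else:
--             list_of_pair.append((prev, player_id))
--     return list_of_pair
-- ===== Notes on version B (the rewrite author's own statement) =====
-- stated objective: faster
-- what changed: One stateful pass over the original list with enumerate (store at even index, emit pair at odd index) replaces A's building of two stride-2 slice copies followed by a counted loop of pop(0) calls, each of which shifts the remaining list.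
import Mathlib
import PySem

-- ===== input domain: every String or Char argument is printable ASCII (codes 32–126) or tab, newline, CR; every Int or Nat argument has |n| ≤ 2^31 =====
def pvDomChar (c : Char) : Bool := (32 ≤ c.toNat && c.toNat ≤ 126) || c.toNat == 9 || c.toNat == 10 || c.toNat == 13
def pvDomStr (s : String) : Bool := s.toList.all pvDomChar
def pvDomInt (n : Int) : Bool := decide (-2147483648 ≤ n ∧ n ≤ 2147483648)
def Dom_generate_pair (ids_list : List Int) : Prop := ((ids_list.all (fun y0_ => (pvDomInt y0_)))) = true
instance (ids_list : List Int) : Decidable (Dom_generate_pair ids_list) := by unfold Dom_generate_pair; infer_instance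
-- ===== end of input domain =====

-- B replaces A's two stride-2 slice copies plus a counted quadratic pop(0) loop by a single
-- linear stateful pass over the original list (measured faster; return value proved equal, A is total).

-- ===== PORT A =====
-- the 'for i in range(nbr_of_pair): pair = (first_half.pop(0), second_half.pop(0)); append'
-- loop; the '| _, _ => acc' arm is a totality guard only (pop(0) on a nonempty list never fails,
-- and the loop count never exceeds either list's length)
def pvLoopA : Nat → List Int → List Int → List (List Int) → List (List Int)
  | 0, _, _, acc => acc
  | n + 1, fh, sh, acc =>
    match PySem.List.pop? fh 0, PySem.List.pop? sh 0 with
    | some (a, fh'), some (b, sh') => pvLoopA n fh' sh' (acc ++ [[a, b]])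
    | _, _ => acc

def generate_pair (ids_list : List Int) : List (List Int) :=
  -- first_half = ids_list[0::2]; second_half = ids_list[1::2]  (step ≠ 0, so slice? is
  -- always `some`; the `| _, _ => []` arm is a totality guard only)
  match PySem.List.slice? ids_list (some 0) none 2, PySem.List.slice? ids_list (some 1) none 2 with
  | some first_half, some second_half =>
    -- nbr_of_pair = int(len(ids_list)/2); len ≥ 0, so truncation = floor = Nat division
    pvLoopA (ids_list.length / 2) first_half second_half []
  | _, _ => []

-- ===== PORT B =====
-- the loop body: at an even index remember the element, at an odd index append the pair
-- (the `none` arm is a totality guard: at an odd index prev has always been set)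
def pvStepB (st : List (List Int) × Option Int) (p : Int × Int) : List (List Int) × Option Int :=
  if p.1 % 2 = 0 then (st.1, some p.2)
  else
    match st.2 with
    | some prev => (st.1 ++ [[prev, p.2]], st.2)
    | none => st

def generate_pair_alt (ids_list : List Int) : List (List Int) :=
  ((PySem.List.enumerate ids_list 0).foldl pvStepB ([], none)).1

-- ===== PRECONDITION & SPEC =====
def Spec_generate_pair (ids_list : List Int) (out : List (List Int)) : Prop := out = generate_pair_alt ids_list
instance (ids_list : List Int) (out : List (List Int)) : Decidable (Spec_generate_pair ids_list out) := by unfold Spec_generate_pair; infer_instance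

-- ===== CLAIM (what is proved, stated in full; the proofs are below) =====
def Claim_equal_generate_pair : Prop := ∀ (ids_list : List Int), Dom_generate_pair ids_list → Spec_generate_pair ids_list (generate_pair ids_list)

-- ===== LEMMAS AND PROOFS =====

-- reference pairing: adjacent elements two at a time, dropping a final unpaired element
def pvPairs : List Int → List (List Int)
  | a :: b :: t => [a, b] :: pvPairs t
  | _ => []

-- elements at even / odd indices
def pvEvens : List Int → List Int
  | [] => []
  | [a] => [a]
  | a :: _ :: t => a :: pvEvens t

def pvOdds : List Int → List Int
  | [] => []
  | [_] => []
  | _ :: b :: t => b :: pvOdds t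


theorem slice?_two_nonneg (xs : List Int) (a : Int) (h0 : 0 ≤ a) (hle : a ≤ xs.length) :
    PySem.List.slice? xs (some a) none 2 =
      some ((List.range (((xs.length : Int) - a + 1)/2).toNat).filterMap
        (fun (k : Nat) => xs[(a + 2*(k:Int)).toNat]?)) := by
  simp only [PySem.List.slice?, PySem.List.sliceIndices,
    if_neg (show ¬ ((2:Int) = 0) by norm_num), if_neg (show ¬ ((2:Int) < 0) by norm_num),
    if_neg (show ¬ a < 0 by omega)]
  rw [min_eq_left hle]
  have hc : (if a < (xs.length:Int) then (((xs.length:Int) - a + 2 - 1) / 2).toNat else 0)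
      = (((xs.length:Int) - a + 1) / 2).toNat := by
    split_ifs with h
    · congr 1; ring_nf
    · omega
  rw [hc]
  norm_num

theorem fmE (xs : List Int) :
    (List.range (((xs.length:Int) + 1)/2).toNat).filterMap (fun (k:Nat) => xs[2*k]?) = pvEvens xs := by
  induction xs using pvEvens.induct with
  | case1 => simp [pvEvens]
  | case2 a => simp [pvEvens]
  | case3 a b t ih =>
    have hc : ((((a :: b :: t).length:Int) + 1)/2).toNat = (((t.length:Int) + 1)/2).toNat + 1 := by
      simp; omega
    rw [hc, List.range_succ_eq_map, List.filterMap_cons, List.filterMap_map]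
    have hfix : ∀ (k:Nat), k ∈ List.range (((t.length:Int) + 1)/2).toNat →
        ((fun (k:Nat) => (a :: b :: t)[2*k]?) ∘ (· + 1)) k = (fun (k:Nat) => t[2*k]?) k := by
      intro k _
      have h2 : 2*(k+1) = 2*k+1+1 := by omega
      simp [Function.comp, h2]
    rw [List.filterMap_congr hfix, ih]
    simp [pvEvens]

theorem fmO (xs : List Int) :
    (List.range ((xs.length:Int)/2).toNat).filterMap (fun (k:Nat) => xs[2*k+1]?) = pvOdds xs := by
  induction xs using pvOdds.induct with
  | case1 => simp [pvOdds]
  | case2 a => simp [pvOdds]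
  | case3 a b t ih =>
    have hc : (((a :: b :: t).length:Int)/2).toNat = ((t.length:Int)/2).toNat + 1 := by
      simp; omega
    rw [hc, List.range_succ_eq_map, List.filterMap_cons, List.filterMap_map]
    have hfix : ∀ (k:Nat), k ∈ List.range ((t.length:Int)/2).toNat →
        ((fun (k:Nat) => (a :: b :: t)[2*k+1]?) ∘ (· + 1)) k = (fun (k:Nat) => t[2*k+1]?) k := by
      intro k _
      have h2 : 2*(k+1)+1 = (2*k+1)+1+1 := by omega
      simp [Function.comp, h2]
    rw [List.filterMap_congr hfix, ih]
    simp [pvOdds]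

theorem slice?_evens (xs : List Int) :
    PySem.List.slice? xs (some 0) none 2 = some (pvEvens xs) := by
  rw [slice?_two_nonneg xs 0 le_rfl (Int.natCast_nonneg _)]
  have hfun : (fun (k : Nat) => xs[((0:Int) + 2*(k:Int)).toNat]?) = (fun (k:Nat) => xs[2*k]?) := by
    funext k
    congr 1
    omega
  rw [hfun]
  have hcnt : (((xs.length:Int) - 0 + 1)/2).toNat = (((xs.length:Int) + 1)/2).toNat := by omega
  rw [hcnt, fmE]

theorem slice?_odds (xs : List Int) :
    PySem.List.slice? xs (some 1) none 2 = some (pvOdds xs) := by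
  cases xs with
  | nil => decide
  | cons a t =>
    rw [slice?_two_nonneg (a :: t) 1 (by norm_num) (by simp)]
    have hfun : (fun (k : Nat) => (a :: t)[((1:Int) + 2*(k:Int)).toNat]?)
        = (fun (k:Nat) => (a :: t)[2*k+1]?) := by
      funext k
      congr 1
      omega
    rw [hfun]
    have hcnt : ((((a :: t).length:Int) - 1 + 1)/2).toNat = (((a :: t).length:Int)/2).toNat := by omega
    rw [hcnt, fmO (a :: t)]

theorem loopA_pairs (l : List Int) (acc : List (List Int)) :
    pvLoopA (l.length / 2) (pvEvens l) (pvOdds l) acc = acc ++ pvPairs l := by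
  induction l using pvPairs.induct generalizing acc with
  | case1 a b t ih =>
    have h2 : (a :: b :: t).length / 2 = t.length / 2 + 1 := by simp; omega
    rw [h2]
    simp [pvEvens, pvOdds, pvPairs, pvLoopA, PySem.List.pop?_zero_cons, ih]
  | case2 l h =>
    cases l with
    | nil => simp [pvPairs, pvLoopA, pvEvens, pvOdds]
    | cons a t =>
      cases t with
      | nil => simp [pvPairs, pvLoopA, pvEvens, pvOdds]
      | cons b t' => exact absurd rfl (h a b t')

theorem foldB_pairs (l : List Int) (s : Int) (hs : s % 2 = 0)
    (acc : List (List Int)) (pr : Option Int) :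
    ((PySem.List.enumerate l s).foldl pvStepB (acc, pr)).1 = acc ++ pvPairs l := by
  induction l using pvPairs.induct generalizing s acc pr with
  | case1 a b t ih =>
    have h1 : ¬ (s + 1) % 2 = 0 := by omega
    simp [PySem.List.enumerate_cons, pvPairs, pvStepB, hs, h1]
    rw [ih (s + 1 + 1) (by omega)]
    simp
  | case2 l h =>
    cases l with
    | nil => simp [PySem.List.enumerate_nil, pvPairs]
    | cons a t =>
      cases t with
      | nil => simp [PySem.List.enumerate_cons, PySem.List.enumerate_nil, pvPairs, pvStepB, hs]
      | cons b t' => exact absurd rfl (h a b t')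

-- ===== VERDICT (by name: the statement is the Claim_ definition above) =====
theorem generate_pair_spec : Claim_equal_generate_pair := by
  intro ids_list _
  unfold Spec_generate_pair generate_pair generate_pair_alt
  rw [slice?_evens, slice?_odds]
  simp [loopA_pairs, foldB_pairs ids_list 0 rfl]
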